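-- pv_equiv track=rewrite | github.com/BossWangST/ProblemSet | python/2022-1-8/leetcode2439.py | minimizeArrayValue
-- ===== SOURCE A (Python) =====
-- from typing import List
-- import bisect
--
-- def minimizeArrayValue(nums: List[int]) -> int:
--     # 二分
--     # 猜一个最小的最大值
--     def check(limit: int) -> int:
--         # a = nums.copy()
--         extra = 0
--         # 从右边往左"推"，看用这个最大值推完到左边，能不能满足 <= limit 的要求
--         for i in range(len(nums) - 1, 0, -1):
--             x = nums[i] + extra
--             if x > limit:
--                 extra = x - limit # 更新 extra, 表示总的还需要往左推的数量
--             else: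
--                 extra = 0
--         return nums[0] + extra <= limit
--
--     return bisect.bisect_left(range(max(nums)), True, key=check)
-- ===== SOURCE B (Python) =====
-- from typing import List
--
--
-- def minimizeArrayValue(nums: List[int]) -> int:
--     # single pass: the answer is max over prefixes of ceil(prefix_sum/(i+1)),
--     # clamped below at 0 (the accumulator starts at 0)
--     ans = 0
--     s = 0
--     for i, x in enumerate(nums):
--         s += x
--         ans = max(ans, -(-s // (i + 1)))
--     return ans
-- ===== Notes on version B (the rewrite author's own statement) =====
-- stated objective: faster
-- what changed: replaced the binary search over [0, max(nums)) with an O(n) single pass taking the maximum of ceil(prefix_sum/(i+1)) over all prefixes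
import Mathlib
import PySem

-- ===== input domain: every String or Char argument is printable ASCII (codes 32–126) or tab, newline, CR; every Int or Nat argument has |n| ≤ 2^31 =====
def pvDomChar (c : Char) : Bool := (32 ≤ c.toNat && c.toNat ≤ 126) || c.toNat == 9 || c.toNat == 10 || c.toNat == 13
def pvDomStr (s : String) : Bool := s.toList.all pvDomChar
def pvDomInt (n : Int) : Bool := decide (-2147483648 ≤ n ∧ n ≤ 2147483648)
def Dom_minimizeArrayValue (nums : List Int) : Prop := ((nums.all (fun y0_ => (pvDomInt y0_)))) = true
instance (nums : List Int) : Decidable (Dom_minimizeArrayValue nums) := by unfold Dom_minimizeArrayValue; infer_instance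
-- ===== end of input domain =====

-- B replaces A's binary search over [0, max(nums)) by a single pass taking the
-- maximum of the ceilings of the prefix averages (asymptotically faster, O(n)).


-- ===== PORT A =====
-- the inner `check(limit)`: push the excess left over indices len-1 .. 1
def pvCheck (nums : List Int) (limit : Int) : Bool :=
  let extra := (PySem.List.pyRange ((nums.length : Int) - 1) 0 (-1)).foldl
    (fun extra i =>
      let x := (PySem.List.pyGetD nums i 0) + extra
      if x > limit then x - limit else 0) 0
  decide ((PySem.List.pyGetD nums 0 0) + extra ≤ limit)

-- bisect.bisect_left(range(M), True, key=check): CPython's loop with a[mid] = mid,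
-- and key(a[mid]) < True  ⟺  check(mid) = false
def pvBisect (nums : List Int) (lo hi : Int) : Int :=
  if _h : lo < hi then
    let mid := PySem.Int.floordiv (lo + hi) 2
    if pvCheck nums mid = false then pvBisect nums (mid + 1) hi
    else pvBisect nums lo mid
  else lo
termination_by (hi - lo).toNat
decreasing_by
  · have := PySem.Int.floordiv_two_mid_bounds (le_of_lt _h)
    omega
  · have := PySem.Int.floordiv_two_mid_bounds (le_of_lt _h)
    have hlt : PySem.Int.floordiv (lo + hi) 2 < hi :=
      (PySem.Int.floordiv_lt_iff_lt_mul (by norm_num)).2 (by omega)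
    omega

def minimizeArrayValue (nums : List Int) : Int :=
  let M := (PySem.List.max? nums (fun y => y)).getD 0   -- some under Pre_ (nums ≠ [])
  pvBisect nums 0 (max M 0)                              -- len(range(M)) = max(M,0)

-- ===== PORT B =====
def minimizeArrayValue_alt (nums : List Int) : Int :=
  ((PySem.List.enumerate nums 0).foldl
    (fun (st : Int × Int) p =>
      let s := st.2 + p.2
      (max st.1 (-(PySem.Int.floordiv (-s) (p.1 + 1))), s))
    (0, 0)).1

-- ===== PRECONDITION & SPEC =====
-- Pre_ excludes only the empty list, on which A raises ValueError (max() of empty sequence)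
def Pre_minimizeArrayValue (nums : List Int) : Prop := nums ≠ []
instance (nums : List Int) : Decidable (Pre_minimizeArrayValue nums) := by
  unfold Pre_minimizeArrayValue; infer_instance

def pvWitness_minimizeArrayValue : List Int := [3, 7, 1, 6]

def Spec_minimizeArrayValue (nums : List Int) (out : Int) : Prop := out = minimizeArrayValue_alt nums
instance (nums : List Int) (out : Int) : Decidable (Spec_minimizeArrayValue nums out) := by unfold Spec_minimizeArrayValue; infer_instance

-- ===== CLAIM (what is proved, stated in full; the proofs are below) =====
def Claim_equal_minimizeArrayValue : Prop := ∀ (nums : List Int), Dom_minimizeArrayValue nums → Pre_minimizeArrayValue nums → Spec_minimizeArrayValue nums (minimizeArrayValue nums)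

-- ===== LEMMAS AND PROOFS =====

-- abstract version of check's accumulator, as a foldr over the tail of nums
def pvExtra (limit : Int) (l : List Int) : Int :=
  l.foldr (fun x e => if x + e > limit then x + e - limit else 0) 0

-- "every nonempty prefix of l, started from running excess a, keeps total excess ≤ 0"
def pvQ (limit a : Int) : List Int → Prop
  | [] => True
  | x :: t => a + x - limit ≤ 0 ∧ pvQ limit (a + x - limit) t

theorem pvExtra_cons (limit x : Int) (t : List Int) :
    pvExtra limit (x :: t)
      = if x + pvExtra limit t > limit then x + pvExtra limit t - limit else 0 := rfl

theorem pvExtra_nonneg (limit : Int) (l : List Int) : 0 ≤ pvExtra limit l := by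
  induction l with
  | nil => simp [pvExtra]
  | cons x t ih =>
    rw [pvExtra_cons]
    split_ifs with h
    · omega
    · omega

theorem pvExtra_iff (limit : Int) (l : List Int) :
    ∀ c : Int, (c + pvExtra limit l ≤ limit ↔ (c ≤ limit ∧ pvQ limit (c - limit) l)) := by
  induction l with
  | nil => intro c; simp [pvExtra, pvQ]
  | cons x t ih =>
    intro c
    have hnn := pvExtra_nonneg limit t
    have h := ih (c + x - limit)
    rw [pvExtra_cons]
    simp only [pvQ]
    have harith : c - limit + x - limit = c + x - limit - limit := by ring
    rw [harith]
    constructor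
    · intro hle
      have h1 : c + x - limit + pvExtra limit t ≤ limit := by split_ifs at hle <;> omega
      have h2 := h.1 h1
      exact ⟨by split_ifs at hle <;> omega, by omega, h2.2⟩
    · rintro ⟨hc, hq1, hq2⟩
      have h3 : c + x - limit + pvExtra limit t ≤ limit := h.2 ⟨by omega, hq2⟩
      split_ifs with hx
      · omega
      · omega

-- the check loop over pyRange(len-1, 0, -1), read as a foldr, computes pvExtra of a suffix
theorem pvFoldr_range_getD (xs : List Int) (limit : Int) :
    ∀ k j : Nat, j + k = xs.length →
      (PySem.List.pyRange (j : Int) (xs.length : Int)).foldr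
        (fun i e =>
          let x := (PySem.List.pyGetD xs i 0) + e
          if x > limit then x - limit else 0) 0
      = pvExtra limit (xs.drop j) := by
  intro k
  induction k with
  | zero =>
    intro j hj
    have hle : (xs.length : Int) ≤ (j : Int) := by exact_mod_cast Nat.le_of_eq (by omega)
    rw [PySem.List.pyRange_one_eq_nil hle, List.drop_eq_nil_of_le (by omega)]
    rfl
  | succ k ih =>
    intro j hj
    have hjlt : j < xs.length := by omega
    rw [PySem.List.pyRange_one_cons (by exact_mod_cast hjlt)]
    have hcast : (j : Int) + 1 = ((j + 1 : Nat) : Int) := by push_cast; ring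
    rw [List.foldr_cons, hcast, ih (j + 1) (by omega)]
    rw [PySem.List.pyGetD_eq_getElem xs 0 (by omega) (by exact_mod_cast hjlt)]
    rw [List.drop_eq_getElem_cons hjlt, pvExtra_cons]
    simp

theorem pvCheck_iff (c : Int) (t : List Int) (limit : Int) :
    pvCheck (c :: t) limit = true ↔ pvQ limit 0 (c :: t) := by
  have hrange := PySem.List.pyRange_neg_one_eq_reverse (((c :: t).length : Int) - 1) 0
  have hfold := pvFoldr_range_getD (c :: t) limit t.length 1 (by simp; omega)
  have hends : ((0 : Int) + 1 = ((1 : Nat) : Int)) ∧ (((c :: t).length : Int) - 1 + 1 = ((c :: t).length : Int)) := by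
    constructor <;> push_cast <;> ring
  rw [hends.1, hends.2] at hrange
  simp only [pvCheck, hrange, List.foldl_reverse]
  rw [hfold]
  have hget : PySem.List.pyGetD (c :: t) 0 0 = c := by
    rw [PySem.List.pyGetD_eq_getElem (c :: t) 0 (by omega) (by simp)]; rfl
  rw [hget, show (c :: t).drop 1 = t from rfl]
  have h := pvExtra_iff limit t c
  simp only [pvQ, zero_add]
  constructor
  · intro hle
    have h2 := h.1 (by exact_mod_cast of_decide_eq_true hle)
    exact ⟨by omega, by simpa using h2.2⟩
  · rintro ⟨h1, h2⟩
    exact decide_eq_true (h.2 ⟨by omega, by simpa using h2⟩)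

-- B's fold, characterised against pvQ
theorem pvAlt_fold_iff (limit : Int) :
    ∀ (l : List Int) (k : Nat) (ans s : Int),
      (((PySem.List.enumerate l (k : Int)).foldl
        (fun (st : Int × Int) p =>
          let s := st.2 + p.2
          (max st.1 (-(PySem.Int.floordiv (-s) (p.1 + 1))), s)) (ans, s)).1 ≤ limit
       ↔ (ans ≤ limit ∧ pvQ limit (s - (k : Int) * limit) l)) := by
  intro l
  induction l with
  | nil => intro k ans s; simp [PySem.List.enumerate, pvQ]
  | cons x t ih =>
    intro k ans s
    have hcons : PySem.List.enumerate (x :: t) (k : Int)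
        = ((k : Int), x) :: PySem.List.enumerate t ((k : Int) + 1) := by
      simp [PySem.List.enumerate]
    have hcast : ((k : Int) + 1) = ((k + 1 : Nat) : Int) := by push_cast; ring
    rw [hcons, List.foldl_cons, hcast]
    have ihh := ih (k + 1) (max ans (-(PySem.Int.floordiv (-(s + x)) ((k + 1 : Nat) : Int)))) (s + x)
    simp only at ihh ⊢
    rw [ihh]
    have hd : (0 : Int) < ((k + 1 : Nat) : Int) := by positivity
    have hceil : (-(PySem.Int.floordiv (-(s + x)) ((k + 1 : Nat) : Int)) ≤ limit
        ↔ s + x ≤ limit * ((k + 1 : Nat) : Int)) := by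
      rw [neg_le, PySem.Int.le_floordiv_iff_mul_le hd, neg_mul, neg_le_neg_iff]
    have heq1 : s + x - ((k + 1 : Nat) : Int) * limit = s - (k : Int) * limit + x - limit := by
      push_cast; ring
    have heq2 : s - (k : Int) * limit + x - limit ≤ 0 ↔ s + x ≤ limit * ((k + 1 : Nat) : Int) := by
      constructor <;> intro hh <;> nlinarith
    simp only [pvQ, max_le_iff, hceil, heq1, heq2]
    tauto

theorem pvAlt_iff (nums : List Int) (limit : Int) :
    minimizeArrayValue_alt nums ≤ limit ↔ (0 ≤ limit ∧ pvQ limit 0 nums) := by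
  have h := pvAlt_fold_iff limit nums 0 0 0
  simp only [Nat.cast_zero, zero_mul, sub_zero] at h
  unfold minimizeArrayValue_alt
  rw [show ((0 : Int)) = ((0 : Nat) : Int) from rfl] at *
  simpa using h

theorem pvAlt_nonneg (nums : List Int) : 0 ≤ minimizeArrayValue_alt nums :=
  ((pvAlt_iff nums (minimizeArrayValue_alt nums)).1 le_rfl).1

theorem pvQ_of_bounded (m : Int) :
    ∀ (l : List Int) (a : Int), a ≤ 0 → (∀ x ∈ l, x ≤ m) → pvQ m a l := by
  intro l
  induction l with
  | nil => intro a _ _; trivial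
  | cons x t ih =>
    intro a ha hb
    have hx : x ≤ m := hb x (by simp)
    exact ⟨by omega, ih _ (by omega) (fun y hy => hb y (by simp [hy]))⟩

theorem pvCheck_key (c : Int) (t : List Int) (limit : Int) (h0 : 0 ≤ limit) :
    pvCheck (c :: t) limit = true ↔ minimizeArrayValue_alt (c :: t) ≤ limit := by
  rw [pvCheck_iff, pvAlt_iff]
  constructor
  · intro h; exact ⟨h0, h⟩
  · intro h; exact h.2

theorem pvBisect_eq (c : Int) (t : List Int) :
    ∀ n (lo hi : Int), (hi - lo).toNat = n → 0 ≤ lo →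
      lo ≤ minimizeArrayValue_alt (c :: t) → minimizeArrayValue_alt (c :: t) ≤ hi →
      pvBisect (c :: t) lo hi = minimizeArrayValue_alt (c :: t) := by
  intro n
  induction n using Nat.strong_induction_on with
  | _ n ih =>
    intro lo hi hn h0 hlo hhi
    rw [pvBisect]
    split_ifs with h
    · have hmid := PySem.Int.floordiv_two_mid_bounds (le_of_lt h)
      have hmidlt : PySem.Int.floordiv (lo + hi) 2 < hi :=
        (PySem.Int.floordiv_lt_iff_lt_mul (by norm_num)).2 (by omega)
      set mid := PySem.Int.floordiv (lo + hi) 2 with hm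
      have hmid0 : 0 ≤ mid := by omega
      by_cases hc : pvCheck (c :: t) mid = true
      · simp only [hc]
        simp only [Bool.true_eq_false, if_false]
        have hle := (pvCheck_key c t mid hmid0).1 hc
        exact ih (mid - lo).toNat (by omega) lo mid rfl h0 hlo hle
      · have hc' : pvCheck (c :: t) mid = false := by
          cases hx : pvCheck (c :: t) mid
          · rfl
          · exact absurd hx hc
        simp only [hc', if_true]
        have hgt : ¬ minimizeArrayValue_alt (c :: t) ≤ mid := fun hle =>
          hc ((pvCheck_key c t mid hmid0).2 hle)
        exact ih (hi - (mid + 1)).toNat (by omega) (mid + 1) hi rfl (by omega) (by omega) hhi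
    · omega

-- ===== VERDICT (by name: the statement is the Claim_ definition above) =====
theorem minimizeArrayValue_spec : Claim_equal_minimizeArrayValue := by
  intro nums _ hpre
  unfold Spec_minimizeArrayValue
  match nums, hpre with
  | c :: t, _ =>
    unfold minimizeArrayValue
    have hmax : ∃ m, PySem.List.max? (c :: t) (fun y => y) = some m := by
      cases hx : PySem.List.max? (c :: t) (fun y => y)
      · exact absurd hx (by simp [PySem.List.max?_eq_none_iff])
      · exact ⟨_, rfl⟩
    obtain ⟨m, hm⟩ := hmax
    rw [hm]
    show pvBisect (c :: t) 0 (max m 0) = minimizeArrayValue_alt (c :: t)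
    have hbound := PySem.List.max?_isMax hm
    have hub : minimizeArrayValue_alt (c :: t) ≤ max m 0 := by
      rw [pvAlt_iff]
      exact ⟨by omega, pvQ_of_bounded _ _ 0 le_rfl (fun x hx => le_trans (hbound x hx) (le_max_left _ _))⟩
    exact pvBisect_eq c t _ 0 (max m 0) rfl le_rfl (pvAlt_nonneg _) hub
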